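-- pv_equiv track=rewrite | github.com/hitriee/problem_solving | programmers/level 2/퍼즐_게임_챌린지.py | solution
-- ===== SOURCE A (Python) =====
-- def solution(diffs, times, limit):
--     # 난이도 배열, 소요 시간 배열, 제한 시간
--     N = len(diffs)
--
--     # 이분탐색
--     start, end = 1, max(diffs)
--     while start <= end:
--         mid = (start + end) // 2
--         total = (diffs[0] - mid) * times[0] if diffs[0] > mid else 0
--         total += times[0]
--         for i in range(1, N):
--             if total > limit:
--                 start = mid + 1
--                 break
--             diff = diffs[i]
--             if diff > mid:
--                 total += (diff - mid) * (times[i - 1] + times[i])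
--             total += times[i]
--         else:
--             if total > limit:
--                 start = mid + 1
--             else:
--                 end = mid - 1
--
--     return start
-- ===== SOURCE B (Python) =====
-- def solution(diffs, times, limit):
--     # Build the (difficulty, penalty-weight, solve-time) triples once, up front,
--     # instead of re-indexing diffs/times on every probe of the binary search;
--     # drive the search by recursion and probe with an early-returning scan.
--     triples = [(diffs[0], times[0], times[0])]
--     for i in range(1, len(diffs)):
--         triples.append((diffs[i], times[i - 1] + times[i], times[i]))
--
--     def over(level):
--         # True iff some prefix total exceeds the limit (checked after each
--         # puzzle, which is equivalent to A's check before the next one).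
--         total = 0
--         for d, w, t in triples:
--             total += (d - level) * w + t if d > level else t
--             if total > limit:
--                 return True
--         return False
--
--     def search(lo, hi):
--         if lo > hi:
--             return lo
--         mid = (lo + hi) // 2
--         if over(mid):
--             return search(mid + 1, hi)
--         return search(lo, mid - 1)
--
--     return search(1, max(diffs))
-- ===== Notes on version B (the rewrite author's own statement) =====
-- stated objective: alternative
-- what changed: B precomputes the (difficulty, penalty-weight, solve-time) triples once before the search instead of re-indexing diffs/times on every probe, replaces the while-loop binary search by a recursive one, and replaces the indexed for-loop with break/else by an early-returning scan over the triples that checks the running total after each puzzle rather than before the next.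
-- outside the precondition, e.g. on solution([0], [], 0): A returns 1, B raises IndexError; on solution([2, 2], [5], 0): A returns 3, B raises IndexError
import Mathlib
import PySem

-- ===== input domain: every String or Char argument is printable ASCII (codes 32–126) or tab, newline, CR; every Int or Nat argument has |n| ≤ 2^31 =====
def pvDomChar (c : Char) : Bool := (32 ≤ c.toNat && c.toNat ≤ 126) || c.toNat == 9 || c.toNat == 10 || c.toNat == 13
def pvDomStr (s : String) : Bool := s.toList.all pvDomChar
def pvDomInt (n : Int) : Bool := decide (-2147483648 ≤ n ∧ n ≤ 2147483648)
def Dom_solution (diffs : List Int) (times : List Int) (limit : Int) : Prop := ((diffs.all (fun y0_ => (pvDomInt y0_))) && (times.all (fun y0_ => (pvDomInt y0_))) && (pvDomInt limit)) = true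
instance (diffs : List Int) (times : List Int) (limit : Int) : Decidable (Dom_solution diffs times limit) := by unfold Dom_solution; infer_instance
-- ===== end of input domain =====

-- B restructures A: the (difficulty, weight, time) triples are built once before the
-- search, the binary search is a recursion instead of a while loop, and each probe is
-- an early-returning scan of the triples; same return value on all of Pre_.

-- ===== PORT A =====
-- 'for i in range(1, N)' with break/else, consuming the remaining index list;
-- true = the 'start = mid + 1' branch fires (break, or the final total > limit)
def solutionInner (diffs times : List Int) (limit mid : Int) : Int → List Int → Bool
  | total, [] => decide (total > limit)
  | total, i :: rest =>
    if total > limit then true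
    else
      let diff := PySem.List.pyGetD diffs i 0
      let total' := total + (if diff > mid then (diff - mid) * (PySem.List.pyGetD times (i - 1) 0 + PySem.List.pyGetD times i 0) else 0) + PySem.List.pyGetD times i 0
      solutionInner diffs times limit mid total' rest

-- 'while start <= end'
def solutionLoop (diffs times : List Int) (limit : Int) (start endv : Int) : Int :=
  if h : start ≤ endv then
    let mid := PySem.Int.floordiv (start + endv) 2
    let d0 := PySem.List.pyGetD diffs 0 0
    let t0 := PySem.List.pyGetD times 0 0
    let total := (if d0 > mid then (d0 - mid) * t0 else 0) + t0
    if solutionInner diffs times limit mid total (PySem.List.pyRange 1 (diffs.length : Int) 1) then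
      solutionLoop diffs times limit (mid + 1) endv
    else
      solutionLoop diffs times limit start (mid - 1)
  else start
termination_by (endv + 1 - start).toNat
decreasing_by
  · have := PySem.Int.floordiv_two_mid_bounds h; omega
  · have := PySem.Int.floordiv_two_mid_bounds h; omega

def solution (diffs : List Int) (times : List Int) (limit : Int) : Int :=
  solutionLoop diffs times limit 1 ((PySem.List.max? diffs (fun x => x)).getD 0)

-- ===== PORT B =====
-- the triples list, built once by the append loop
def solutionAltTriples (diffs times : List Int) : List (Int × Int × Int) :=
  (PySem.List.pyRange 1 (diffs.length : Int) 1).foldl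
    (fun acc i => acc ++ [(PySem.List.pyGetD diffs i 0, PySem.List.pyGetD times (i - 1) 0 + PySem.List.pyGetD times i 0, PySem.List.pyGetD times i 0)])
    [(PySem.List.pyGetD diffs 0 0, PySem.List.pyGetD times 0 0, PySem.List.pyGetD times 0 0)]

-- 'over(level)': early-returning scan of the triples
def solutionAltOver (limit level : Int) : Int → List (Int × Int × Int) → Bool
  | _, [] => false
  | total, (d, w, t) :: rest =>
    let total' := total + (if d > level then (d - level) * w + t else t)
    if total' > limit then true else solutionAltOver limit level total' rest

-- 'search(lo, hi)': the recursive binary search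
def solutionAltSearch (triples : List (Int × Int × Int)) (limit lo hi : Int) : Int :=
  if h : lo > hi then lo
  else
    let mid := PySem.Int.floordiv (lo + hi) 2
    if solutionAltOver limit mid 0 triples then
      solutionAltSearch triples limit (mid + 1) hi
    else
      solutionAltSearch triples limit lo (mid - 1)
termination_by (hi + 1 - lo).toNat
decreasing_by
  · have := PySem.Int.floordiv_two_mid_bounds (by omega : lo ≤ hi); omega
  · have := PySem.Int.floordiv_two_mid_bounds (by omega : lo ≤ hi); omega

def solution_alt (diffs : List Int) (times : List Int) (limit : Int) : Int :=
  solutionAltSearch (solutionAltTriples diffs times) limit 1 ((PySem.List.max? diffs (fun x => x)).getD 0)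

-- ===== PRECONDITION & SPEC =====
-- Pre_ excludes inputs where a Python raises: empty diffs (max(diffs) is a ValueError in A)
-- and times shorter than diffs — B builds every triple up front, so it raises IndexError
-- there even on the inputs where A's early break happens to return before indexing out of range.
def Pre_solution (diffs : List Int) (times : List Int) (limit : Int) : Prop :=
  diffs ≠ [] ∧ diffs.length ≤ times.length

instance (diffs : List Int) (times : List Int) (limit : Int) : Decidable (Pre_solution diffs times limit) := by
  unfold Pre_solution; infer_instance

def pvWitness_solution : List Int × List Int × Int := ([3, 1, 4], [2, 5, 3], 10)

def Spec_solution (diffs : List Int) (times : List Int) (limit : Int) (out : Int) : Prop := out = solution_alt diffs times limit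

instance (diffs : List Int) (times : List Int) (limit : Int) (out : Int) : Decidable (Spec_solution diffs times limit out) := by
  unfold Spec_solution; infer_instance

-- ===== CLAIM (what is proved, stated in full; the proofs are below) =====
def Claim_equal_solution : Prop := ∀ (diffs : List Int) (times : List Int) (limit : Int), Dom_solution diffs times limit → Pre_solution diffs times limit → Spec_solution diffs times limit (solution diffs times limit)

-- ===== LEMMAS AND PROOFS =====

-- the increment map the appended triples realise
def pvTrip (diffs times : List Int) (i : Int) : Int × Int × Int :=
  (PySem.List.pyGetD diffs i 0, PySem.List.pyGetD times (i - 1) 0 + PySem.List.pyGetD times i 0, PySem.List.pyGetD times i 0)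

theorem pvTriples_eq (diffs times : List Int) :
    solutionAltTriples diffs times =
      (PySem.List.pyGetD diffs 0 0, PySem.List.pyGetD times 0 0, PySem.List.pyGetD times 0 0) ::
        (PySem.List.pyRange 1 (diffs.length : Int) 1).map (pvTrip diffs times) := by
  unfold solutionAltTriples pvTrip
  rw [PySem.List.foldl_append_singleton_eq_map]
  rfl

-- A's check-before-the-next-step loop equals B's check-after-each-step scan, offset by the
-- pending check on the running total (list induction; no property of the index list is used)
theorem pvInner_eq_over (diffs times : List Int) (limit mid : Int) :
    ∀ (is : List Int) (total : Int),
      solutionInner diffs times limit mid total is =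
        (if total > limit then true else solutionAltOver limit mid total (is.map (pvTrip diffs times))) := by
  intro is
  induction is with
  | nil => intro total; simp [solutionInner, solutionAltOver]
  | cons i rest ih =>
    intro total
    rw [solutionInner]
    by_cases h : total > limit
    · simp [h]
    · simp only [h, if_false, List.map_cons]
      rw [ih]
      rw [solutionAltOver]
      have harith :
          total + (if PySem.List.pyGetD diffs i 0 > mid then
              (PySem.List.pyGetD diffs i 0 - mid) * (PySem.List.pyGetD times (i - 1) 0 + PySem.List.pyGetD times i 0) else 0) +
              PySem.List.pyGetD times i 0 =
            total + (if (pvTrip diffs times i).1 > mid then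
              ((pvTrip diffs times i).1 - mid) * (pvTrip diffs times i).2.1 + (pvTrip diffs times i).2.2
              else (pvTrip diffs times i).2.2) := by
        unfold pvTrip; split_ifs <;> ring
      simp only [pvTrip] at harith ⊢
      rw [harith]

-- per-probe decisions agree
theorem pvDecision_eq (diffs times : List Int) (limit mid : Int) :
    solutionInner diffs times limit mid
        ((if PySem.List.pyGetD diffs 0 0 > mid then (PySem.List.pyGetD diffs 0 0 - mid) * PySem.List.pyGetD times 0 0 else 0) + PySem.List.pyGetD times 0 0)
        (PySem.List.pyRange 1 (diffs.length : Int) 1) =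
      solutionAltOver limit mid 0 (solutionAltTriples diffs times) := by
  rw [pvTriples_eq, solutionAltOver, pvInner_eq_over]
  have harith : (0 : Int) + (if PySem.List.pyGetD diffs 0 0 > mid then
      (PySem.List.pyGetD diffs 0 0 - mid) * PySem.List.pyGetD times 0 0 + PySem.List.pyGetD times 0 0 else PySem.List.pyGetD times 0 0) =
      (if PySem.List.pyGetD diffs 0 0 > mid then (PySem.List.pyGetD diffs 0 0 - mid) * PySem.List.pyGetD times 0 0 else 0) + PySem.List.pyGetD times 0 0 := by
    split_ifs <;> ring
  simp only [harith]

-- the two searches coincide step by step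
theorem pvLoop_eq_search (diffs times : List Int) (limit : Int) :
    ∀ (n : Nat) (s e : Int), (e + 1 - s).toNat = n →
      solutionLoop diffs times limit s e = solutionAltSearch (solutionAltTriples diffs times) limit s e := by
  intro n
  induction n using Nat.strong_induction_on with
  | _ n ih =>
    intro s e hn
    rw [solutionLoop, solutionAltSearch]
    by_cases h : s ≤ e
    · have hb := PySem.Int.floordiv_two_mid_bounds h
      simp only [h, dif_pos, show ¬ s > e by omega, dif_neg, not_false_iff]
      rw [pvDecision_eq]
      by_cases hd : solutionAltOver limit (PySem.Int.floordiv (s + e) 2) 0 (solutionAltTriples diffs times)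
      · simp only [hd, if_pos]
        exact ih _ (by omega) _ _ rfl
      · simp only [hd, if_neg, Bool.false_eq_true, not_false_iff]
        exact ih _ (by omega) _ _ rfl
    · simp [h, show s > e by omega]

-- ===== VERDICT (by name: the statement is the Claim_ definition above) =====
theorem solution_spec : Claim_equal_solution := by
  intro diffs times limit _ _
  unfold Spec_solution solution solution_alt
  exact pvLoop_eq_search diffs times limit _ 1 _ rfl
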